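-- pv_equiv track=rewrite | github.com/HarryPratt/coding-practice | codality/6-NumbersOfDiscIntersections.py | solution
-- ===== SOURCE A (Python) =====
-- from bisect import bisect_right
--
-- def solution(A):
--     pairs = 0
--
--     # create an array of tuples, each containing the start and end indices of a disk
--     # some indices may be less than 0 or greater than len(A), this is fine!
--     # sort the array by the first entry of each tuple: the disk start indices
--     intervals = sorted([(i - A[i], i + A[i]) for i in range(len(A))])
--
--     # create an array of starting indices using tuples in intervals
--     starts = [i[0] for i in intervals]
--
--     # for each disk in order of the *starting* position of the disk, not the centre
--     for i in range(len(starts)):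
--
--         # find the end position of that disk from the array of tuples
--         disk_end = intervals[i][1]
--
--         # find the index of the rightmost value less than or equal to the interval-end
--         # this finds the number of disks that have started before disk i ends
--         count = bisect_right(starts, disk_end)
--
--         # subtract current position to exclude previous matches
--         # this bit seemed 'magic' to me, so I think of it like this...
--         # for disk i, i disks that start to the left have already been dealt with
--         # subtract i from count to prevent double counting
--         # subtract one more to prevent counting the disk itsself
--         count -= i + 1
--         pairs += count
--         if pairs > 10000000:
--             return -1
--     return pairs
-- ===== SOURCE B (Python) =====
-- def solution(A):
--     n = len(A)
--     intervals = sorted([(i - A[i], i + A[i]) for i in range(n)])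
--     lows = [p[0] for p in intervals]
--     # for each disk (in start order) compute, by a single linear merge over the
--     # disks taken in END order, the number of starts <= its end (replaces bisect)
--     byend = sorted([(iv[1], k) for k, iv in enumerate(intervals)])
--     cnt = [0] * n
--     j = 0
--     for e, k in byend:
--         while j < n and lows[j] <= e:
--             j += 1
--         cnt[k] = j
--     pairs = 0
--     for i in range(n):
--         pairs += cnt[i] - i - 1
--         if pairs > 10000000:
--             return -1
--     return pairs
-- ===== Notes on version B (the rewrite author's own statement) =====
-- stated objective: alternative
-- what changed: Replaces A's per-disk binary search (bisect_right on the sorted starts) by one extra sort of the disk ends and a single linear two-pointer merge that fills a count array, keeping the same per-disk accumulation and early -1 exit.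
import Mathlib
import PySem

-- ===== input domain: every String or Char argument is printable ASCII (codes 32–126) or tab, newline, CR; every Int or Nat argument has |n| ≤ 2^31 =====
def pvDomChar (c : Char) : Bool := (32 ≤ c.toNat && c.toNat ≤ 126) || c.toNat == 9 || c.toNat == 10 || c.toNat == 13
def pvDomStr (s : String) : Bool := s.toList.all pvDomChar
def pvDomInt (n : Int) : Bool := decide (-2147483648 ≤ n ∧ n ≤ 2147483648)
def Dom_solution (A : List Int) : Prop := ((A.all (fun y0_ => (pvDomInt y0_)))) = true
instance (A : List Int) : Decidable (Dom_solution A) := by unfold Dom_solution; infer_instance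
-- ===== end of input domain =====

-- B replaces A's per-disk binary search (bisect_right) by one extra sort of the disk
-- ends and a single linear two-pointer merge filling a count array (objective: alternative).

-- ===== PORT A =====
-- A's loop: for i in range(len(starts)), with early 'return -1'; structural recursion on the
-- number of remaining iterations, i and pairs carried as in the Python.
def solutionGoA (intervals : List (Int × Int)) (starts : List Int) : Nat → Int → Int → Int
  | 0, _, pairs => pairs
  | rem + 1, i, pairs =>
    let disk_end := (PySem.List.pyGetD intervals i (0, 0)).2
    let count := (PySem.List.bisectRight starts disk_end : Int) - (i + 1)
    let pairs' := pairs + count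
    if pairs' > 10000000 then -1 else solutionGoA intervals starts rem (i + 1) pairs'

def solution (A : List Int) : Int :=
  let intervals := PySem.List.sorted2
    ((PySem.List.pyRange 0 (A.length : Int) 1).map
      (fun i => (i - PySem.List.pyGetD A i 0, i + PySem.List.pyGetD A i 0)))
    (fun p => p.1) (fun p => p.2)
  let starts := intervals.map (fun p => p.1)
  solutionGoA intervals starts starts.length 0 0

-- ===== PORT B =====
-- 'while j < n and lows[j] <= e: j += 1'  (n = len(lows))
def advanceB (lows : List Int) (e : Int) (j : Nat) : Nat :=
  if h : j < lows.length then
    (if lows[j] ≤ e then advanceB lows e (j + 1) else j)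
  else j
termination_by lows.length - j

-- 'for e, k in byend: …; cnt[k] = j'
def mergeGoB (lows : List Int) : List (Int × Int) → List Int → Nat → List Int
  | [], cnt, _ => cnt
  | (e, k) :: rest, cnt, j =>
    let j' := advanceB lows e j
    mergeGoB lows rest (PySem.List.pySetD cnt k (j' : Int)) j'

-- 'for i in range(n): pairs += cnt[i] - i - 1; if pairs > 10000000: return -1'
def solutionGoB (cnt : List Int) : Nat → Int → Int → Int
  | 0, _, pairs => pairs
  | rem + 1, i, pairs =>
    let pairs' := pairs + (PySem.List.pyGetD cnt i 0 - i - 1)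
    if pairs' > 10000000 then -1 else solutionGoB cnt rem (i + 1) pairs'

def solution_alt (A : List Int) : Int :=
  let n := A.length
  let intervals := PySem.List.sorted2
    ((PySem.List.pyRange 0 (n : Int) 1).map
      (fun i => (i - PySem.List.pyGetD A i 0, i + PySem.List.pyGetD A i 0)))
    (fun p => p.1) (fun p => p.2)
  let lows := intervals.map (fun p => p.1)
  let byend := PySem.List.sorted2
    ((PySem.List.enumerate intervals).map (fun p => (p.2.2, p.1)))
    (fun p => p.1) (fun p => p.2)
  let cnt := mergeGoB lows byend (List.replicate n 0) 0
  solutionGoB cnt n 0 0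

-- ===== PRECONDITION & SPEC =====
def Spec_solution (A : List Int) (out : Int) : Prop := out = solution_alt A
instance (A : List Int) (out : Int) : Decidable (Spec_solution A out) := by unfold Spec_solution; infer_instance

-- ===== CLAIM (what is proved, stated in full; the proofs are below) =====
def Claim_equal_solution : Prop := ∀ (A : List Int), Dom_solution A → Spec_solution A (solution A)

-- ===== LEMMAS AND PROOFS =====

-- sorted2 (the port of Python's tuple sort) is nondecreasing in its first key
theorem insertBy_pairwise {α : Type} (R : α → α → Prop) (before : α → α → Bool)
    (hT : ∀ a b c, R a b → R b c → R a c)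
    (h1 : ∀ a b, before a b = true → R a b) (h2 : ∀ a b, before a b = false → R b a)
    (x : α) (ys : List α) (hys : ys.Pairwise R) :
    (PySem.List.insertBy before x ys).Pairwise R := by
  induction ys with
  | nil => simp [PySem.List.insertBy]
  | cons y ys ih =>
    rcases List.pairwise_cons.mp hys with ⟨hy, hys'⟩
    by_cases hb : before x y = true
    · simp only [PySem.List.insertBy, hb, if_true]
      refine List.pairwise_cons.mpr ⟨?_, hys⟩
      intro z hz
      rcases List.mem_cons.mp hz with rfl | hz'
      · exact h1 _ _ hb
      · exact hT _ _ _ (h1 _ _ hb) (hy _ hz')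
    · simp only [PySem.List.insertBy, hb]
      refine List.pairwise_cons.mpr ⟨?_, ih hys'⟩
      intro z hz
      rcases (PySem.List.mem_insertBy before x z ys).mp hz with rfl | hz'
      · exact h2 _ _ (by simpa using hb)
      · exact hy _ hz'

theorem sorted2_pairwise_k1 {α : Type} (xs : List α) (k1 k2 : α → Int) :
    (PySem.List.sorted2 xs k1 k2).Pairwise (fun a b => k1 a ≤ k1 b) := by
  show (List.foldl _ [] xs).Pairwise _
  suffices h : ∀ (acc : List α), acc.Pairwise (fun a b => k1 a ≤ k1 b) →
      (List.foldl (fun acc x => PySem.List.insertBy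
        (fun a b => decide (k1 a < k1 b) || (!decide (k1 b < k1 a) && decide (k2 a < k2 b))) x acc) acc xs).Pairwise
        (fun a b => k1 a ≤ k1 b) by
    exact h [] (by simp)
  induction xs with
  | nil => intro acc h; simpa using h
  | cons x xs ih =>
    intro acc hacc
    simp only [List.foldl_cons]
    refine ih _ (insertBy_pairwise (fun a b => k1 a ≤ k1 b) _ (fun a b c => le_trans) ?_ ?_ x acc hacc)
    · intro a b hb
      simp only [Bool.or_eq_true, Bool.and_eq_true, Bool.not_eq_true', decide_eq_true_eq, decide_eq_false_iff_not] at hb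
      rcases hb with h | ⟨h, _⟩
      · exact le_of_lt h
      · exact le_of_not_gt h
    · intro a b hb
      simp only [Bool.or_eq_false_iff, Bool.and_eq_false_iff, Bool.not_eq_false', decide_eq_true_eq, decide_eq_false_iff_not] at hb
      exact le_of_not_gt hb.1

-- the while-loop of B advances j to the exact boundary between lows ≤ e and lows > e
theorem advanceB_spec (lows : List Int) (hs : lows.Pairwise (· ≤ ·)) (e : Int) (j : Nat)
    (hj : j ≤ lows.length)
    (hlow : ∀ m (_ : m < lows.length), m < j → lows[m] ≤ e) :
    j ≤ advanceB lows e j ∧ advanceB lows e j ≤ lows.length ∧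
      (∀ m (_ : m < lows.length), m < advanceB lows e j → lows[m] ≤ e) ∧
      (∀ m (_ : m < lows.length), advanceB lows e j ≤ m → e < lows[m]) := by
  have hmono := List.pairwise_iff_getElem.mp hs
  induction j using advanceB.induct lows e with
  | case1 j h hle ih =>
    rw [advanceB, dif_pos h, if_pos hle]
    have step : ∀ m (_ : m < lows.length), m < j + 1 → lows[m] ≤ e := by
      intro m hm hmj
      rcases Nat.lt_succ_iff_lt_or_eq.mp hmj with h' | rfl
      · exact hlow m hm h'
      · exact hle
    have := ih (by omega) step
    refine ⟨by omega, this.2.1, this.2.2.1, this.2.2.2⟩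
  | case2 j h hgt =>
    rw [advanceB, dif_pos h, if_neg hgt]
    replace hgt := lt_of_not_ge hgt
    refine ⟨le_refl _, by omega, hlow, ?_⟩
    intro m hm hjm
    rcases Nat.eq_or_lt_of_le hjm with rfl | h'
    · exact hgt
    · exact lt_of_lt_of_le hgt (hmono j m h hm h')
  | case3 j h =>
    rw [advanceB, dif_neg h]
    exact ⟨le_refl _, hj, hlow, fun m hm hjm => absurd (lt_of_lt_of_le hm (by omega)) (lt_irrefl _)⟩

-- a boundary with both threshold properties is exactly bisect_right
theorem count_unique (lows : List Int) (hs : lows.Pairwise (· ≤ ·)) (e : Int) (c : Nat)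
    (hc : c ≤ lows.length)
    (h1 : ∀ m (_ : m < lows.length), m < c → lows[m] ≤ e)
    (h2 : ∀ m (_ : m < lows.length), c ≤ m → e < lows[m]) :
    c = PySem.List.bisectRight lows e := by
  obtain ⟨hb, hb1, hb2⟩ := PySem.List.bisectRight_spec lows e hs
  set b := PySem.List.bisectRight lows e with hbdef
  rcases lt_trichotomy c b with h | h | h
  · have hcl : c < lows.length := lt_of_lt_of_le h hb
    exact absurd (hb1 c hcl h) (not_le_of_gt (h2 c hcl (le_refl _)))
  · exact h
  · have hbl : b < lows.length := lt_of_lt_of_le h hc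
    exact absurd (h1 b hbl h) (not_le_of_gt (hb2 b hbl (le_refl _)))

theorem pyGetD_pySetD_int (xs : List Int) (k m : Int) (v d : Int)
    (h0 : 0 ≤ k) (h0m : 0 ≤ m) (h1 : k < (xs.length : Int)) :
    PySem.List.pyGetD (PySem.List.pySetD xs k v) m d
      = if m = k then v else PySem.List.pyGetD xs m d := by
  obtain ⟨kn, rfl⟩ := Int.eq_ofNat_of_zero_le h0
  obtain ⟨mn, rfl⟩ := Int.eq_ofNat_of_zero_le h0m
  rw [PySem.List.pyGetD_pySetD_natCast xs kn mn v d (by exact_mod_cast h1)]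
  by_cases h : mn = kn
  · simp [h]
  · rw [if_neg h, if_neg (by exact_mod_cast h)]

-- B's merge loop fills cnt[k] with bisect_right(lows, e) for every (e, k) it processes
theorem mergeGoB_spec (lows : List Int) (hs : lows.Pairwise (· ≤ ·)) :
    ∀ (rest : List (Int × Int)) (cnt : List Int) (j : Nat),
      cnt.length = lows.length →
      rest.Pairwise (fun a b => a.1 ≤ b.1) →
      (∀ p ∈ rest, 0 ≤ p.2 ∧ p.2 < (lows.length : Int)) →
      (rest.map (fun p => p.2)).Nodup →
      j ≤ lows.length →
      (∀ p ∈ rest, ∀ m (_ : m < lows.length), m < j → lows[m] ≤ p.1) →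
      (∀ p ∈ rest, PySem.List.pyGetD (mergeGoB lows rest cnt j) p.2 0
          = (PySem.List.bisectRight lows p.1 : Int)) ∧
      (∀ i : Int, 0 ≤ i → (∀ e, (e, i) ∉ rest) →
        PySem.List.pyGetD (mergeGoB lows rest cnt j) i 0 = PySem.List.pyGetD cnt i 0) := by
  intro rest
  induction rest with
  | nil => intro cnt j _ _ _ _ _ _; exact ⟨fun p hp => absurd hp (List.not_mem_nil), fun i _ _ => rfl⟩
  | cons q rest ih =>
    obtain ⟨e, k⟩ := q
    intro cnt j hlen hpw hrange hnd hj hlow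
    obtain ⟨hj1, hj2, hj3, hj4⟩ := advanceB_spec lows hs e j hj
      (fun m hm hmj => hlow (e, k) List.mem_cons_self m hm hmj)
    rcases List.pairwise_cons.mp hpw with ⟨hhead, hpw'⟩
    have hrange' : ∀ p ∈ rest, 0 ≤ p.2 ∧ p.2 < (lows.length : Int) :=
      fun p hp => hrange p (List.mem_cons_of_mem _ hp)
    have hnd' : (rest.map (fun p => p.2)).Nodup := (List.nodup_cons.mp hnd).2
    have hknotin : k ∉ rest.map (fun p => p.2) := (List.nodup_cons.mp hnd).1
    have hlow' : ∀ p ∈ rest, ∀ m (_ : m < lows.length), m < advanceB lows e j → lows[m] ≤ p.1 :=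
      fun p hp m hm hmj => le_trans (hj3 m hm hmj) (hhead p hp)
    have hlen' : (PySem.List.pySetD cnt k ((advanceB lows e j : Nat) : Int)).length = lows.length := by
      rw [PySem.List.length_pySetD]; exact hlen
    obtain ⟨IH1, IH2⟩ := ih (PySem.List.pySetD cnt k ((advanceB lows e j : Nat) : Int))
      (advanceB lows e j) hlen' hpw' hrange' hnd' hj2 hlow'
    have hk0 : 0 ≤ k := (hrange (e, k) List.mem_cons_self).1
    have hk1 : k < (lows.length : Int) := (hrange (e, k) List.mem_cons_self).2
    have hkcnt : k < (cnt.length : Int) := by rw [hlen]; exact hk1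
    constructor
    · intro p hp
      rcases List.mem_cons.mp hp with rfl | hp'
      · -- p = (e, k): this entry is written now and never overwritten later
        show PySem.List.pyGetD (mergeGoB lows rest _ _) k 0 = _
        rw [IH2 k hk0 (fun e' hmem => hknotin (List.mem_map.mpr ⟨(e', k), hmem, rfl⟩))]
        rw [pyGetD_pySetD_int cnt k k _ 0 hk0 hk0 hkcnt, if_pos rfl]
        congr 1
        exact count_unique lows hs e (advanceB lows e j) hj2 hj3 hj4
      · exact IH1 p hp'
    · intro i hi0 hi
      have hik : i ≠ k := fun h => hi e (h ▸ List.mem_cons_self)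
      show PySem.List.pyGetD (mergeGoB lows rest _ _) i 0 = _
      rw [IH2 i hi0 (fun e' he' => hi e' (List.mem_cons_of_mem _ he'))]
      rw [pyGetD_pySetD_int cnt k i _ 0 hk0 hi0 hkcnt, if_neg hik]

-- the two final accumulation loops agree step by step
theorem go_eq (intervals : List (Int × Int)) (cnt : List Int) (n : Nat)
    (hn : intervals.length = n)
    (hcnt : ∀ (k : Nat) (hk : k < n),
      PySem.List.pyGetD cnt (k : Int) 0
        = (PySem.List.bisectRight (intervals.map (fun p => p.1)) (intervals[k]'(by rw [hn]; exact hk)).2 : Int)) :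
    ∀ (rem : Nat) (k : Nat) (pairs : Int), rem + k = n →
      solutionGoA intervals (intervals.map (fun p => p.1)) rem (k : Int) pairs
        = solutionGoB cnt rem (k : Int) pairs := by
  intro rem
  induction rem with
  | zero => intro k pairs _; rfl
  | succ rem ih =>
    intro k pairs hrk
    have hk : k < n := by omega
    have hki : (k : Int) < (intervals.length : Int) := by rw [hn]; exact_mod_cast hk
    have hgetI : PySem.List.pyGetD intervals (k : Int) (0, 0) = intervals[k]'(by rw [hn]; exact hk) := by
      rw [PySem.List.pyGetD_eq_getElem intervals (0, 0) (by positivity) hki]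
      simp
    show (let disk_end := (PySem.List.pyGetD intervals (k : Int) (0, 0)).2
          let count := (PySem.List.bisectRight (intervals.map (fun p => p.1)) disk_end : Int) - ((k : Int) + 1)
          let pairs' := pairs + count
          if pairs' > 10000000 then -1
          else solutionGoA intervals (intervals.map (fun p => p.1)) rem ((k : Int) + 1) pairs') = _
    show _ = (let pairs' := pairs + (PySem.List.pyGetD cnt (k : Int) 0 - (k : Int) - 1)
          if pairs' > 10000000 then -1 else solutionGoB cnt rem ((k : Int) + 1) pairs')
    simp only [hgetI, hcnt k hk]
    have harith : pairs + ((PySem.List.bisectRight (intervals.map (fun p => p.1))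
        (intervals[k]'(by rw [hn]; exact hk)).2 : Int) - ((k : Int) + 1))
      = pairs + ((PySem.List.bisectRight (intervals.map (fun p => p.1))
        (intervals[k]'(by rw [hn]; exact hk)).2 : Int) - (k : Int) - 1) := by ring
    rw [harith]
    split_ifs with h
    · rfl
    · have : ((k : Int) + 1) = ((k + 1 : Nat) : Int) := by push_cast; ring
      rw [this, ih (k + 1) _ (by omega)]

-- ===== VERDICT (by name: the statement is the Claim_ definition above) =====
theorem solution_spec : Claim_equal_solution := by
  intro A _
  unfold Spec_solution solution solution_alt
  set base := (PySem.List.pyRange 0 (A.length : Int) 1).map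
      (fun i => (i - PySem.List.pyGetD A i 0, i + PySem.List.pyGetD A i 0)) with hbase
  set intervals := PySem.List.sorted2 base (fun p => p.1) (fun p => p.2) with hI
  have hlenI : intervals.length = A.length := by
    rw [hI, (PySem.List.sorted2_perm base _ _ false).length_eq]
    simp [hbase, PySem.List.length_pyRange_one]
  set lows := intervals.map (fun p => p.1) with hlows
  have hlenL : lows.length = A.length := by simp [hlows, hlenI]
  have hs : lows.Pairwise (· ≤ ·) := by
    rw [hlows]
    exact List.pairwise_map.mpr (sorted2_pairwise_k1 base _ _)
  set byendbase := (PySem.List.enumerate intervals).map (fun p => (p.2.2, p.1)) with hbb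
  set byend := PySem.List.sorted2 byendbase (fun p => p.1) (fun p => p.2) with hbe
  have hperm : byend.Perm byendbase := PySem.List.sorted2_perm byendbase _ _ false
  have hmemE : ∀ p ∈ byend, ∃ (k : Nat) (hk : k < intervals.length),
      p = ((intervals[k]'hk).2, (k : Int)) := by
    intro p hp
    have hp' : p ∈ byendbase := hperm.mem_iff.mp hp
    rw [hbb] at hp'
    obtain ⟨q, hq, rfl⟩ := List.mem_map.mp hp'
    obtain ⟨k, hk, rfl⟩ := (PySem.List.mem_enumerate_iff intervals 0 q).mp hq
    exact ⟨k, hk, by simp⟩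
  have hrange : ∀ p ∈ byend, 0 ≤ p.2 ∧ p.2 < (lows.length : Int) := by
    intro p hp
    obtain ⟨k, hk, rfl⟩ := hmemE p hp
    refine ⟨by positivity, ?_⟩
    have hlt : k < lows.length := by omega
    show (k : Int) < (lows.length : Int)
    exact_mod_cast hlt
  have hnd : (byend.map (fun p => p.2)).Nodup := by
    refine ((hperm.map (fun p => p.2)).nodup_iff).mpr ?_
    rw [hbb, List.map_map]
    have : ((fun q : Int × Int => q.2) ∘ (fun p : Int × (Int × Int) => (p.2.2, p.1)))
        = fun p : Int × (Int × Int) => p.1 := rfl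
    rw [this, PySem.List.map_fst_enumerate]
    exact PySem.List.nodup_pyRange_one _ _
  have hpwE : byend.Pairwise (fun a b => a.1 ≤ b.1) := sorted2_pairwise_k1 byendbase _ _
  set cnt := mergeGoB lows byend (List.replicate A.length 0) 0 with hcntdef
  have hlenR : (List.replicate A.length (0 : Int)).length = lows.length := by
    simp [hlenL]
  obtain ⟨MS1, _⟩ := mergeGoB_spec lows hs byend (List.replicate A.length 0) 0 hlenR hpwE
    hrange hnd (by omega) (fun p _ m _ hm0 => absurd hm0 (Nat.not_lt_zero m))
  have hcnt : ∀ (k : Nat) (hk : k < A.length),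
      PySem.List.pyGetD cnt (k : Int) 0
        = (PySem.List.bisectRight lows (intervals[k]'(by rw [hlenI]; exact hk)).2 : Int) := by
    intro k hk
    have hk' : k < intervals.length := by rw [hlenI]; exact hk
    have hmem : ((intervals[k]'hk').2, (k : Int)) ∈ byend := by
      refine hperm.mem_iff.mpr ?_
      rw [hbb]
      refine List.mem_map.mpr ⟨((0 : Int) + (k : Nat), intervals[k]'hk'), ?_, by simp⟩
      exact (PySem.List.mem_enumerate_iff intervals 0 _).mpr ⟨k, hk', rfl⟩
    exact MS1 ((intervals[k]'hk').2, (k : Int)) hmem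
  show solutionGoA intervals lows lows.length 0 0 = solutionGoB cnt A.length 0 0
  rw [hlenL]
  have := go_eq intervals cnt A.length hlenI hcnt A.length 0 0 (by omega)
  simpa using this
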